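-- pv_equiv track=rewrite | github.com/eliottcassidy2000/math | 04-computation/skeleton_n6_alpha2.py | ham_path_count_dp_endpoints
-- ===== SOURCE A (Python) =====
-- def ham_path_count_dp_endpoints(A):
--     """Count Hamiltonian paths by start and end vertex."""
--     n = len(A)
--     dp = [[0] * n for _ in range(1 << n)]
--     # dp[mask][v] = paths through mask ending at v, starting at the first set bit
--     # Better: dp_start[s][mask][v] = paths starting at s through mask ending at v
--     # More efficient: just track (mask, end) and sum over starts at the end
--
--     for s in range(n):
--         dp[1 << s][s] = 1
--
--     for mask in range(1, 1 << n):
--         for v in range(n):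
--             if not (mask & (1 << v)) or dp[mask][v] == 0:
--                 continue
--             for u in range(n):
--                 if (mask & (1 << u)) or A[v][u] != 1:
--                     continue
--                 dp[mask | (1 << u)][u] += dp[mask][v]
--
--     # Now dp[(1<<n)-1][v] = total paths ending at v (from any start)
--     full = (1 << n) - 1
--     return sum(dp[full][v] for v in range(n))
-- ===== SOURCE B (Python) =====
-- def ham_path_count_dp_endpoints(A):
--     """Count Hamiltonian paths via Karp's inclusion-exclusion: for each vertex
--     subset S count directed walks of n-1 steps confined to S, and alternate signs;
--     walks that miss a vertex cancel, leaving exactly the Hamiltonian paths."""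
--     n = len(A)
--     total = 0
--     for S in range(1 << n):
--         w = [1 if (S >> v) & 1 else 0 for v in range(n)]
--         for _ in range(n - 1):
--             w = [sum(w[u] for u in range(n)
--                      if u != v and (S >> u) & 1 and A[u][v] == 1)
--                  if (S >> v) & 1 else 0
--                  for v in range(n)]
--         bits = bin(S).count("1")
--         total += (-1) ** (n - bits) * sum(w)
--     return total
-- ===== Notes on version B (the rewrite author's own statement) =====
-- stated objective: alternative
-- what changed: Replaced the dp[mask][endpoint] bitmask DP by Karp's inclusion-exclusion: for every vertex subset S it counts length-(n-1) directed walks confined to S by iterated vector-matrix products and sums them with sign (-1)^(n-|S|); no per-endpoint path table exists, correctness comes from cancellation of walks missing a vertex.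
import Mathlib
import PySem

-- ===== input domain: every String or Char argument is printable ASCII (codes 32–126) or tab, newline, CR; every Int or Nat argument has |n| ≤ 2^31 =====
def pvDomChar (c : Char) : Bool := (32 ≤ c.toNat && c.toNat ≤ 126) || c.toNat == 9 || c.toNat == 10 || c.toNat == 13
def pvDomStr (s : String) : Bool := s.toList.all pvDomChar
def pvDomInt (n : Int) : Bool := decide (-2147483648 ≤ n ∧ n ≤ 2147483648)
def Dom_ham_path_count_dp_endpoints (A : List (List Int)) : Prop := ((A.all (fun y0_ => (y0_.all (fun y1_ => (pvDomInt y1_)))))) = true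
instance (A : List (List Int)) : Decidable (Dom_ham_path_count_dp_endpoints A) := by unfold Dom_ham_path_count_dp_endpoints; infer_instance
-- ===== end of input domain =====

-- B replaces A's dp[mask][endpoint] bitmask DP by Karp's inclusion-exclusion: for each vertex
-- subset S it counts length-(n-1) walks confined to S and sums them with sign (-1)^(n-|S|);
-- walks missing a vertex cancel, leaving exactly the Hamiltonian paths.  Same return value.
-- dp tables of A are modelled as a list of point updates read through pvGet (most recent first);
-- indexing A[v][u] is ported with getD, exact on Pre_ (indices are nonnegative and in range there).

-- ===== PORT A =====

-- a dp table is a list of point updates, most recent first (Python's dp[m][v] = x); missing = 0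
def pvGet : List ((Nat × Nat) × Int) → Nat → Nat → Int
  | [], _, _ => 0
  | ((km, kv), x) :: rest, p, q => if p = km ∧ q = kv then x else pvGet rest p q

def pvUpd (dp : List ((Nat × Nat) × Int)) (m v : Nat) (x : Int) : List ((Nat × Nat) × Int) :=
  ((m, v), x) :: dp

-- for s in range(n): dp[1 << s][s] = 1
def pvBase (n : Nat) : List ((Nat × Nat) × Int) :=
  (List.range n).foldl (fun dp s => pvUpd dp (1 <<< s) s 1) []

-- body of A's 'for mask in range(1, 1 << n)' loop (push: scatter dp[mask][v] to successors)
def pvPushStep (A : List (List Int)) (n : Nat) (dp : List ((Nat × Nat) × Int)) (mask : Nat) : List ((Nat × Nat) × Int) :=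
  (List.range n).foldl (fun dp v =>
    if mask.testBit v = false ∨ pvGet dp mask v = 0 then dp
    else (List.range n).foldl (fun dp u =>
      if mask.testBit u = true ∨ (A.getD v []).getD u 0 ≠ 1 then dp
      else pvUpd dp (mask ||| 1 <<< u) u (pvGet dp (mask ||| 1 <<< u) u + pvGet dp mask v)) dp) dp

def ham_path_count_dp_endpoints (A : List (List Int)) : Int :=
  let n := A.length
  let dp := (List.range' 1 ((1 <<< n) - 1)).foldl (pvPushStep A n) (pvBase n)
  (List.range n).foldl (fun acc v => acc + pvGet dp ((1 <<< n) - 1) v) 0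

-- ===== PORT B =====

-- bin(S).count("1")
def pvBits (m : Nat) : Nat :=
  if h : m = 0 then 0 else m % 2 + pvBits (m / 2)
decreasing_by exact Nat.div_lt_self (Nat.pos_of_ne_zero h) one_lt_two

-- w = [1 if (S >> v) & 1 else 0 for v in range(n)]
def pvW0 (n S : Nat) : List Int :=
  (List.range n).map (fun v => if S.testBit v then (1 : Int) else 0)

-- one step of B's walk-vector iteration
def pvWStep (A : List (List Int)) (n S : Nat) (w : List Int) : List Int :=
  (List.range n).map (fun v =>
    if S.testBit v then
      (List.range n).foldl (fun acc u =>
        if u ≠ v ∧ S.testBit u = true ∧ (A.getD u []).getD v 0 = 1 then acc + w.getD u 0 else acc) 0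
    else 0)

def ham_path_count_dp_endpoints_alt (A : List (List Int)) : Int :=
  let n := A.length
  (List.range (1 <<< n)).foldl (fun total S =>
    let w := (List.range (n - 1)).foldl (fun w _ => pvWStep A n S w) (pvW0 n S)
    total + (-1 : Int) ^ (n - pvBits S) * w.sum) 0

-- ===== PRECONDITION & SPEC =====
-- Pre_ excludes exactly the inputs where Python A raises IndexError: for n ≥ 2, row v is indexed at
-- every column u < n with u ≠ v, so row v must have length ≥ n (≥ n-1 for the last row); for n ≤ 1
-- no entry of A is ever read.  (B's Python reads exactly the same entries and raises there too.)
def Pre_ham_path_count_dp_endpoints (A : List (List Int)) : Prop :=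
  A.length ≤ 1 ∨ ∀ v < A.length,
    (if v = A.length - 1 then A.length - 1 else A.length) ≤ (A.getD v []).length
instance (A : List (List Int)) : Decidable (Pre_ham_path_count_dp_endpoints A) := by
  unfold Pre_ham_path_count_dp_endpoints; infer_instance

def pvWitness_ham_path_count_dp_endpoints : List (List Int) := [[0, 1], [1, 0]]

def Spec_ham_path_count_dp_endpoints (A : List (List Int)) (out : Int) : Prop := out = ham_path_count_dp_endpoints_alt A
instance (A : List (List Int)) (out : Int) : Decidable (Spec_ham_path_count_dp_endpoints A out) := by unfold Spec_ham_path_count_dp_endpoints; infer_instance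

-- ===== CLAIM (what is proved, stated in full; the proofs are below) =====
def Claim_equal_ham_path_count_dp_endpoints : Prop := ∀ (A : List (List Int)), Dom_ham_path_count_dp_endpoints A → Pre_ham_path_count_dp_endpoints A → Spec_ham_path_count_dp_endpoints A (ham_path_count_dp_endpoints A)

-- ===== LEMMAS AND PROOFS =====

------------------------------------------------------------------------------
-- generic small lemmas
------------------------------------------------------------------------------

lemma pvGet_upd (dp : List ((Nat × Nat) × Int)) (m v : Nat) (x : Int) (p q : Nat) :
    pvGet (pvUpd dp m v x) p q = if p = m ∧ q = v then x else pvGet dp p q := rfl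

lemma pvXorLt {m v : Nat} (h : m.testBit v = true) : m ^^^ 1 <<< v < m := by
  rw [Nat.one_shiftLeft]
  apply Nat.lt_of_testBit v
  · simp [Nat.testBit_xor, h]
  · exact h
  · intro j hj
    simp [Nat.testBit_xor, Nat.ne_of_lt hj]

lemma pvTestBitOr (m u j : Nat) : (m ||| 1 <<< u).testBit j = (m.testBit j || decide (j = u)) := by
  rcases eq_or_ne j u with rfl | hne
  · simp [Nat.testBit_or, Nat.one_shiftLeft]
  · simp [Nat.testBit_or, Nat.one_shiftLeft, hne, Ne.symm hne]

lemma pvOrXorCancel {m u : Nat} (h : m.testBit u = false) : (m ||| 1 <<< u) ^^^ 1 <<< u = m := by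
  apply Nat.eq_of_testBit_eq
  intro j
  simp only [Nat.testBit_xor, Nat.testBit_or, Nat.one_shiftLeft, Nat.testBit_two_pow]
  rcases eq_or_ne u j with rfl | hne
  · simp [h]
  · simp [hne]

lemma pvXorOrCancel {m v : Nat} (h : m.testBit v = true) : (m ^^^ 1 <<< v) ||| 1 <<< v = m := by
  apply Nat.eq_of_testBit_eq
  intro j
  simp only [Nat.testBit_or, Nat.testBit_xor, Nat.one_shiftLeft, Nat.testBit_two_pow]
  rcases eq_or_ne v j with rfl | hne
  · simp [h]
  · simp [hne]

lemma pvTestBitXorShift (m v j : Nat) :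
    (m ^^^ 1 <<< v).testBit j = if j = v then !(m.testBit v) else m.testBit j := by
  rcases eq_or_ne j v with rfl | hne
  · simp [Nat.one_shiftLeft, Nat.testBit_xor]
  · simp [Nat.one_shiftLeft, Nat.testBit_xor, hne, Ne.symm hne]

lemma pvOrNe {m u : Nat} (h : m.testBit u = false) : m ||| 1 <<< u ≠ m := by
  intro he
  have h2 := congrArg (fun x => Nat.testBit x u) he
  simp [h] at h2

lemma pvOrNeOne {m u : Nat} (hm : 1 ≤ m) (h : m.testBit u = false) : m ||| 1 <<< u ≠ 1 <<< u := by
  intro he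
  have h2 := pvOrXorCancel h
  rw [he, Nat.xor_self] at h2
  omega

lemma pvFoldlIf (c : Nat → Prop) [DecidablePred c] (f : Nat → Int) :
    ∀ (L : List Nat) (acc : Int),
      L.foldl (fun a v => if c v then a + f v else a) acc
        = acc + (L.map (fun v => if c v then f v else 0)).sum := by
  intro L
  induction L with
  | nil => simp
  | cons a L ih =>
    intro acc
    simp only [List.foldl_cons, List.map_cons, List.sum_cons]
    by_cases h : c a
    · rw [if_pos h, ih, if_pos h]; ring
    · rw [if_neg h, ih, if_neg h]; ring

lemma pvFoldlAdd (f : Nat → Int) :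
    ∀ (L : List Nat) (acc : Int),
      L.foldl (fun a v => a + f v) acc = acc + (L.map f).sum := by
  intro L
  induction L with
  | nil => simp
  | cons a L ih => intro acc; simp only [List.foldl_cons, List.map_cons, List.sum_cons]; rw [ih]; ring

lemma pvSumRange (f : Nat → Int) : ∀ (n : Nat),
    ((List.range n).map f).sum = ∑ i ∈ Finset.range n, f i := by
  intro n
  induction n with
  | zero => simp
  | succ n ih => rw [List.range_succ, List.map_append, List.sum_append, Finset.sum_range_succ, ih]; simp

------------------------------------------------------------------------------
-- A's dp invariant: dp[mask][v] becomes pvF (number of nodup walks with vertex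
-- set exactly mask ending at v) once all masks ≤ k have been pushed
------------------------------------------------------------------------------

def pvF (A : List (List Int)) (n : Nat) (m : Nat) (v : Nat) : Int :=
  if h : v < n ∧ m.testBit v = true then
    if m = 1 <<< v then 1
    else (List.range n).foldl (fun acc u =>
      if u ≠ v ∧ m.testBit u = true ∧ (A.getD u []).getD v 0 = 1 then
        acc + pvF A n (m ^^^ 1 <<< v) u
      else acc) 0
  else 0
termination_by m
decreasing_by exact pvXorLt h.2

lemma pvBaseAux (m v : Nat) :
    ∀ (L : List Nat) (dp : List ((Nat × Nat) × Int)),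
      pvGet (L.foldl (fun dp s => pvUpd dp (1 <<< s) s 1) dp) m v
        = if v ∈ L ∧ m = 1 <<< v then 1 else pvGet dp m v := by
  intro L
  induction L with
  | nil => simp
  | cons a L ih =>
    intro dp
    simp only [List.foldl_cons]
    rw [ih]
    by_cases h1 : v ∈ L ∧ m = 1 <<< v
    · rw [if_pos h1, if_pos ⟨List.mem_cons_of_mem _ h1.1, h1.2⟩]
    · rw [if_neg h1]
      show (if m = 1 <<< a ∧ v = a then (1:Int) else pvGet dp m v) = _
      by_cases h2 : m = 1 <<< a ∧ v = a
      · rw [if_pos h2, if_pos ⟨by simp [h2.2], by rw [h2.2]; exact h2.1⟩]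
      · rw [if_neg h2, if_neg]
        rintro ⟨hv, hm⟩
        rcases List.mem_cons.1 hv with rfl | hv'
        · exact h2 ⟨hm, rfl⟩
        · exact h1 ⟨hv', hm⟩

lemma pvBase_apply (n m v : Nat) : pvGet (pvBase n) m v = if m = 1 <<< v ∧ v < n then 1 else 0 := by
  unfold pvBase
  rw [pvBaseAux]
  simp [List.mem_range, and_comm, pvGet]

lemma pvPushInner (A : List (List Int)) (mask v : Nat) :
    ∀ (L : List Nat), L.Nodup → ∀ (dp : List ((Nat × Nat) × Int)) (p q : Nat),
      pvGet (L.foldl (fun dp u =>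
        if mask.testBit u = true ∨ (A.getD v []).getD u 0 ≠ 1 then dp
        else pvUpd dp (mask ||| 1 <<< u) u (pvGet dp (mask ||| 1 <<< u) u + pvGet dp mask v)) dp) p q
      = pvGet dp p q + (if q ∈ L ∧ mask.testBit q = false ∧ (A.getD v []).getD q 0 = 1 ∧ p = mask ||| 1 <<< q
          then pvGet dp mask v else 0) := by
  intro L
  induction L with
  | nil => simp
  | cons a L ih =>
    intro hnd dp p q
    simp only [List.foldl_cons]
    by_cases hg : mask.testBit a = true ∨ (A.getD v []).getD a 0 ≠ 1
    · rw [if_pos hg, ih (List.Nodup.of_cons hnd) dp p q]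
      by_cases hq : q ∈ L ∧ mask.testBit q = false ∧ (A.getD v []).getD q 0 = 1 ∧ p = mask ||| 1 <<< q
      · rw [if_pos hq, if_pos ⟨List.mem_cons_of_mem _ hq.1, hq.2⟩]
      · rw [if_neg hq, if_neg]
        rintro ⟨hmem, h2, h3, h4⟩
        rcases List.mem_cons.1 hmem with rfl | hmem'
        · rcases hg with hg | hg
          · rw [h2] at hg; exact Bool.false_ne_true hg
          · exact hg h3
        · exact hq ⟨hmem', h2, h3, h4⟩
    · rw [if_neg hg]
      push_neg at hg
      obtain ⟨hta, hedge⟩ := hg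
      have hta' : mask.testBit a = false := by
        cases h : mask.testBit a
        · rfl
        · exact absurd h hta
      have hane : mask ||| 1 <<< a ≠ mask := pvOrNe hta'
      set dp' := pvUpd dp (mask ||| 1 <<< a) a (pvGet dp (mask ||| 1 <<< a) a + pvGet dp mask v) with hdp'
      have hmv : pvGet dp' mask v = pvGet dp mask v := by
        rw [hdp', pvGet_upd, if_neg]
        rintro ⟨h1, _⟩
        exact hane h1.symm
      rw [ih (List.Nodup.of_cons hnd) dp' p q, hmv]
      by_cases hq : q ∈ L ∧ mask.testBit q = false ∧ (A.getD v []).getD q 0 = 1 ∧ p = mask ||| 1 <<< q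
      · rw [if_pos hq, if_pos ⟨List.mem_cons_of_mem _ hq.1, hq.2⟩]
        have hqa : q ≠ a := fun he => (List.nodup_cons.1 hnd).1 (he ▸ hq.1)
        have : pvGet dp' p q = pvGet dp p q := by
          rw [hdp', pvGet_upd, if_neg]; rintro ⟨_, h2⟩; exact hqa h2
        rw [this]
      · rw [if_neg hq]
        by_cases hqa : p = mask ||| 1 <<< a ∧ q = a
        · have hcond : q ∈ a :: L ∧ mask.testBit q = false ∧ (A.getD v []).getD q 0 = 1 ∧ p = mask ||| 1 <<< q := by
            refine ⟨by simp [hqa.2], ?_, ?_, ?_⟩ <;> rw [hqa.2] <;> [exact hta'; exact hedge; exact hqa.1]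
          rw [if_pos hcond]
          have : pvGet dp' p q = pvGet dp (mask ||| 1 <<< a) a + pvGet dp mask v := by
            rw [hdp', pvGet_upd, if_pos ⟨hqa.1, hqa.2⟩]
          rw [this, hqa.1, hqa.2]; ring
        · have : pvGet dp' p q = pvGet dp p q := by
            rw [hdp', pvGet_upd, if_neg hqa]
          rw [this, if_neg]
          rintro ⟨hmem, h2, h3, h4⟩
          rcases List.mem_cons.1 hmem with rfl | hmem'
          · exact hqa ⟨h4, rfl⟩
          · exact hq ⟨hmem', h2, h3, h4⟩

lemma pvPushOuter (A : List (List Int)) (n mask : Nat) :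
    ∀ (L' : List Nat) (dp dp₀ : List ((Nat × Nat) × Int)), (∀ w, pvGet dp mask w = pvGet dp₀ mask w) →
    ∀ p q, pvGet (L'.foldl (fun dp v =>
        if mask.testBit v = false ∨ pvGet dp mask v = 0 then dp
        else (List.range n).foldl (fun dp u =>
          if mask.testBit u = true ∨ (A.getD v []).getD u 0 ≠ 1 then dp
          else pvUpd dp (mask ||| 1 <<< u) u (pvGet dp (mask ||| 1 <<< u) u + pvGet dp mask v)) dp) dp) p q
      = pvGet dp p q + (if q < n ∧ mask.testBit q = false ∧ p = mask ||| 1 <<< q then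
          ((L'.map (fun w => if mask.testBit w = true ∧ (A.getD w []).getD q 0 = 1 then pvGet dp₀ mask w else 0)).sum)
        else 0) := by
  intro L'
  induction L' with
  | nil => intro dp dp₀ hdp p q; simp
  | cons a L' ih =>
    intro dp dp₀ hdp p q
    simp only [List.foldl_cons, List.map_cons, List.sum_cons]
    by_cases hg : mask.testBit a = false ∨ pvGet dp mask a = 0
    · rw [if_pos hg, ih dp dp₀ hdp p q]
      have hhead : (if mask.testBit a = true ∧ (A.getD a []).getD q 0 = 1 then pvGet dp₀ mask a else 0) = 0 := by
        rcases hg with h | h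
        · rw [if_neg]; rintro ⟨h1, _⟩; rw [h] at h1; exact Bool.false_ne_true h1
        · split
          · rw [← hdp a, h]
          · rfl
      rw [hhead, zero_add]
    · rw [if_neg hg]
      push_neg at hg
      obtain ⟨hta, hnz⟩ := hg
      have hta' : mask.testBit a = true := by
        cases h : mask.testBit a
        · exact absurd h hta
        · rfl
      have hinner := pvPushInner A mask a (List.range n) List.nodup_range dp
      have hdp2 : ∀ w, pvGet ((List.range n).foldl (fun dp u =>
          if mask.testBit u = true ∨ (A.getD a []).getD u 0 ≠ 1 then dp
          else pvUpd dp (mask ||| 1 <<< u) u (pvGet dp (mask ||| 1 <<< u) u + pvGet dp mask a)) dp) mask w = pvGet dp₀ mask w := by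
        intro w
        rw [hinner mask w]
        have : (if w ∈ List.range n ∧ mask.testBit w = false ∧ (A.getD a []).getD w 0 = 1 ∧ mask = mask ||| 1 <<< w then pvGet dp mask a else 0) = 0 := by
          rw [if_neg]; rintro ⟨_, h2, _, h4⟩; exact pvOrNe h2 h4.symm
        rw [this, add_zero, hdp w]
      rw [ih _ dp₀ hdp2 p q, hinner p q]
      by_cases hc : q < n ∧ mask.testBit q = false ∧ p = mask ||| 1 <<< q
      · rw [if_pos hc, if_pos hc]
        by_cases hedge : (A.getD a []).getD q 0 = 1
        · rw [if_pos ⟨List.mem_range.2 hc.1, hc.2.1, hedge, hc.2.2⟩, if_pos ⟨hta', hedge⟩, hdp a]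
          ring
        · rw [if_neg (by rintro ⟨_, _, h3, _⟩; exact hedge h3), if_neg (by rintro ⟨_, h2⟩; exact hedge h2)]
          ring
      · rw [if_neg hc, if_neg hc, if_neg]
        · ring
        · rintro ⟨hmem, h2, h3, h4⟩
          exact hc ⟨List.mem_range.1 hmem, h2, h4⟩

lemma pvInvA (A : List (List Int)) (n : Nat) :
    ∀ (k m v : Nat),
      pvGet ((List.range' 1 k).foldl (pvPushStep A n) (pvBase n)) m v
        = if (m ^^^ 1 <<< v) ≤ k ∧ m.testBit v = true ∧ v < n then pvF A n m v else 0 := by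
  intro k
  induction k with
  | zero =>
    intro m v
    rw [show List.range' 1 0 = ([] : List Nat) from rfl]
    simp only [List.foldl_nil]
    rw [pvBase_apply]
    by_cases h : m = 1 <<< v ∧ v < n
    · rw [if_pos h]
      have htb : m.testBit v = true := by
        rw [h.1]; simp [Nat.one_shiftLeft]
      have hx : m ^^^ 1 <<< v = 0 := by rw [h.1, Nat.xor_self]
      rw [if_pos ⟨Nat.le_of_eq hx, htb, h.2⟩]
      rw [pvF, dif_pos ⟨h.2, htb⟩, if_pos h.1]
    · rw [if_neg h, if_neg]
      rintro ⟨hle, _, hlt⟩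
      exact h ⟨Nat.xor_eq_zero_iff.mp (Nat.le_zero.1 hle), hlt⟩
  | succ k ih =>
    intro m v
    rw [List.range'_concat, List.foldl_append]
    simp only [List.foldl_cons, List.foldl_nil]
    rw [show 1 + 1 * k = k + 1 by omega]
    set dpk := (List.range' 1 k).foldl (pvPushStep A n) (pvBase n) with hdpk
    show pvGet (pvPushStep A n dpk (k + 1)) m v = _
    unfold pvPushStep
    rw [pvPushOuter A n (k + 1) (List.range n) dpk dpk (fun w => rfl) m v]
    by_cases hc : v < n ∧ (k + 1).testBit v = false ∧ m = (k + 1) ||| 1 <<< v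
    · obtain ⟨h1, h2, h3⟩ := hc
      rw [if_pos ⟨h1, h2, h3⟩]
      have hpred : m ^^^ 1 <<< v = k + 1 := by rw [h3]; exact pvOrXorCancel h2
      have htbm : m.testBit v = true := by rw [h3, pvTestBitOr]; simp
      rw [ih m v, if_neg (by rintro ⟨hle, _, _⟩; rw [hpred] at hle; omega)]
      have hmap : ∀ w ∈ List.range n,
          (if (k + 1).testBit w = true ∧ (A.getD w []).getD v 0 = 1 then pvGet dpk (k + 1) w else 0)
            = (if (k + 1).testBit w = true ∧ (A.getD w []).getD v 0 = 1 then pvF A n (k + 1) w else 0) := by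
        intro w hw
        by_cases hcw : (k + 1).testBit w = true ∧ (A.getD w []).getD v 0 = 1
        · rw [if_pos hcw, if_pos hcw, ih,
            if_pos ⟨Nat.lt_succ_iff.mp (pvXorLt hcw.1), hcw.1, List.mem_range.1 hw⟩]
        · rw [if_neg hcw, if_neg hcw]
      rw [List.map_congr_left hmap]
      rw [if_pos ⟨Nat.le_of_eq hpred, htbm, h1⟩]
      conv_rhs => rw [pvF]
      have hne1 : m ≠ 1 <<< v := by rw [h3]; exact pvOrNeOne (by omega) h2
      rw [dif_pos ⟨h1, htbm⟩, if_neg hne1, hpred]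
      rw [pvFoldlIf (fun u => u ≠ v ∧ m.testBit u = true ∧ (A.getD u []).getD v 0 = 1)
        (fun u => pvF A n (k + 1) u)]
      have hfun : (fun w => if (k + 1).testBit w = true ∧ (A.getD w []).getD v 0 = 1 then pvF A n (k + 1) w else 0)
          = (fun u => if u ≠ v ∧ m.testBit u = true ∧ (A.getD u []).getD v 0 = 1 then pvF A n (k + 1) u else 0) := by
        funext u
        by_cases huv : u = v
        · subst huv
          rw [if_neg (by rintro ⟨h, _⟩; rw [h2] at h; exact Bool.false_ne_true h),
            if_neg (by rintro ⟨h, _⟩; exact h rfl)]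
        · have hb : m.testBit u = (k + 1).testBit u := by rw [h3, pvTestBitOr]; simp [huv]
          by_cases hcw : (k + 1).testBit u = true ∧ (A.getD u []).getD v 0 = 1
          · rw [if_pos hcw, if_pos ⟨huv, by rw [hb]; exact hcw.1, hcw.2⟩]
          · rw [if_neg hcw, if_neg]
            rintro ⟨_, htb, hedge⟩
            exact hcw ⟨by rw [← hb]; exact htb, hedge⟩
      rw [hfun]
    · rw [if_neg hc, add_zero, ih m v]
      by_cases hcond : m.testBit v = true ∧ v < n
      · by_cases heq : m ^^^ 1 <<< v = k + 1
        · exfalso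
          apply hc
          refine ⟨hcond.2, ?_, ?_⟩
          · rw [← heq, pvTestBitXorShift]; simp [hcond.1]
          · rw [← heq, pvXorOrCancel hcond.1]
        · have hiff : ((m ^^^ 1 <<< v) ≤ k ∧ m.testBit v = true ∧ v < n)
              ↔ ((m ^^^ 1 <<< v) ≤ k + 1 ∧ m.testBit v = true ∧ v < n) := by
            constructor
            · rintro ⟨hle, a, b⟩; exact ⟨by omega, a, b⟩
            · rintro ⟨hle, a, b⟩; exact ⟨by omega, a, b⟩
          rw [if_congr hiff rfl rfl]
      · rw [if_neg (by rintro ⟨_, a, b⟩; exact hcond ⟨a, b⟩),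
          if_neg (by rintro ⟨_, a, b⟩; exact hcond ⟨a, b⟩)]

------------------------------------------------------------------------------
-- walks: the common combinatorial object both programs count
------------------------------------------------------------------------------

-- all directed walks with k edges on vertices < n, stored reversed (head = endpoint)
def pvWalks (A : List (List Int)) (n : Nat) : Nat → List (List Nat)
  | 0 => (List.range n).map (fun v => [v])
  | k+1 => (pvWalks A n k).flatMap (fun p =>
      ((List.range n).filter (fun v => decide (p.headI ≠ v) && decide ((A.getD p.headI []).getD v 0 = 1))).map
        (fun v => v :: p))

def pvMaskOf (p : List Nat) : Nat := p.foldr (fun x acc => acc ||| 1 <<< x) 0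

def pvCnt (l : List (List Nat)) (q : List Nat → Bool) : Int :=
  (l.map (fun p => if q p then (1 : Int) else 0)).sum

def pvQW (S v : Nat) (p : List Nat) : Bool := (p.headI == v) && p.all (fun x => S.testBit x)

def pvQF (m v : Nat) (p : List Nat) : Bool :=
  (p.headI == v) && ((pvMaskOf p == m) && decide p.Nodup)

lemma pvCnt_congr {l : List (List Nat)} {q r : List Nat → Bool}
    (h : ∀ p ∈ l, q p = r p) : pvCnt l q = pvCnt l r := by
  unfold pvCnt
  rw [List.map_congr_left (fun p hp => by rw [h p hp])]

lemma pvCnt_false {l : List (List Nat)} {q : List Nat → Bool}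
    (h : ∀ p ∈ l, q p = false) : pvCnt l q = 0 := by
  unfold pvCnt
  rw [List.map_congr_left (fun p hp => by rw [h p hp])]
  simp

lemma pvCnt_flatMap (l : List (List Nat)) (f : List Nat → List (List Nat)) (q : List Nat → Bool) :
    pvCnt (l.flatMap f) q = (l.map (fun p => pvCnt (f p) q)).sum := by
  induction l with
  | nil => rfl
  | cons a l ih =>
    simp only [List.flatMap_cons, List.map_cons, List.sum_cons, ← ih]
    unfold pvCnt
    rw [List.map_append, List.sum_append]

lemma pvCnt_partition (n : Nat) (l : List (List Nat)) (hl : ∀ p ∈ l, p.headI < n)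
    (r : List Nat → Bool) :
    ∑ v ∈ Finset.range n, pvCnt l (fun p => (p.headI == v) && r p) = pvCnt l r := by
  induction l with
  | nil => simp [pvCnt]
  | cons a l ih =>
    have hstep : pvCnt (a :: l) r = (if r a then (1:Int) else 0) + pvCnt l r := by
      unfold pvCnt; rw [List.map_cons, List.sum_cons]
    rw [hstep]
    have hstep2 : ∀ v, pvCnt (a :: l) (fun p => (p.headI == v) && r p)
        = (if (a.headI == v) && r a then (1:Int) else 0) + pvCnt l (fun p => (p.headI == v) && r p) := by
      intro v; unfold pvCnt; rw [List.map_cons, List.sum_cons]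
    simp only [hstep2]
    rw [Finset.sum_add_distrib, ih (fun p hp => hl p (List.mem_cons_of_mem a hp))]
    congr 1
    have ha : a.headI < n := hl a List.mem_cons_self
    by_cases hr : r a = true
    · rw [if_pos hr]
      have hterm : ∀ v, (if (a.headI == v) && r a then (1:Int) else 0) = if v = a.headI then 1 else 0 := by
        intro v
        by_cases hv : v = a.headI
        · subst hv; simp [hr]
        · have : ¬ (a.headI == v) = true := by
            simp only [beq_iff_eq]; intro h; exact hv h.symm
          simp [this, hv]
      simp only [hterm]
      rw [Finset.sum_ite_eq' (Finset.range n) a.headI (fun _ => (1:Int)),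
        if_pos (Finset.mem_range.2 ha)]
    · have hr' : r a = false := by cases h : r a; rfl; exact absurd h hr
      simp [hr']

lemma pvIndSumRange (b : Nat → Bool) (v : Nat) : ∀ (n : Nat),
    ((List.range n).map (fun u => if (u == v) && b u then (1:Int) else 0)).sum
      = if v < n ∧ b v = true then 1 else 0 := by
  intro n
  induction n with
  | zero => simp
  | succ n ih =>
    rw [List.range_succ, List.map_append, List.sum_append, ih]
    have hlast : (List.map (fun u => if (u == v) && b u then (1:Int) else 0) [n]).sum
        = if v = n ∧ b v = true then 1 else 0 := by
      by_cases hv2 : v = n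
      · subst hv2
        by_cases hb : b v = true <;> simp [hb]
      · have hne : (n == v) = false := by
          rw [beq_eq_false_iff_ne]; omega
        simp [hne, hv2]
        intro hx
        exact absurd hx.symm hv2
    rw [hlast]
    by_cases hb : b v = true
    · by_cases hv2 : v = n
      · subst hv2
        rw [if_neg (by omega), if_pos ⟨rfl, hb⟩, if_pos ⟨by omega, hb⟩]
        ring
      · by_cases hv : v < n
        · rw [if_pos ⟨hv, hb⟩, if_neg (fun h => hv2 h.1), if_pos ⟨by omega, hb⟩]
          ring
        · rw [if_neg (fun h => hv h.1), if_neg (fun h => hv2 h.1), if_neg (by omega)]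
          ring
    · rw [if_neg (fun h => hb h.2), if_neg (fun h => hb h.2), if_neg (fun h => hb h.2)]
      ring

lemma pvFilterIndSum (c q : Nat → Bool) : ∀ (l : List Nat),
    ((l.filter c).map (fun u => if q u then (1:Int) else 0)).sum
      = (l.map (fun u => if c u && q u then (1:Int) else 0)).sum := by
  intro l
  induction l with
  | nil => rfl
  | cons a l ih =>
    by_cases hc : c a = true
    · rw [List.filter_cons_of_pos hc]
      simp only [List.map_cons, List.sum_cons, ih, hc, Bool.true_and]
    · have hc' : c a = false := by cases h : c a; rfl; exact absurd h hc
      rw [List.filter_cons_of_neg (by simp [hc'])]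
      simp [ih, hc']

lemma pvHeadI_mem : ∀ (p : List Nat), p ≠ [] → p.headI ∈ p := by
  intro p h
  cases p with
  | nil => exact absurd rfl h
  | cons a l => simp [List.headI]

lemma pvWalks_shape (A : List (List Int)) (n : Nat) :
    ∀ (k : Nat) (p : List Nat), p ∈ pvWalks A n k → p.length = k + 1 ∧ ∀ x ∈ p, x < n := by
  intro k
  induction k with
  | zero =>
    intro p hp
    simp only [pvWalks, List.mem_map, List.mem_range] at hp
    obtain ⟨v, hv, rfl⟩ := hp
    constructor
    · rfl
    · intro x hx; simp at hx; omega
  | succ k ih =>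
    intro p hp
    simp only [pvWalks, List.mem_flatMap, List.mem_map, List.mem_filter, List.mem_range] at hp
    obtain ⟨p', hp', v, ⟨hv, _⟩, rfl⟩ := hp
    obtain ⟨hlen, hmem⟩ := ih p' hp'
    constructor
    · simp [hlen]
    · intro x hx
      rcases List.mem_cons.1 hx with rfl | hx'
      · exact hv
      · exact hmem x hx'

lemma pvWalks_headI_lt (A : List (List Int)) (n k : Nat) (p : List Nat)
    (hp : p ∈ pvWalks A n k) : p.headI < n := by
  obtain ⟨hlen, hmem⟩ := pvWalks_shape A n k p hp
  exact hmem _ (pvHeadI_mem p (by intro h; rw [h] at hlen; simp at hlen))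

lemma pvTestBit_maskOf : ∀ (p : List Nat) (x : Nat),
    (pvMaskOf p).testBit x = decide (x ∈ p) := by
  intro p
  induction p with
  | nil => intro x; simp [pvMaskOf]
  | cons a p ih =>
    intro x
    show ((pvMaskOf p) ||| 1 <<< a).testBit x = _
    rw [Nat.testBit_or, ih, Nat.one_shiftLeft, Nat.testBit_two_pow]
    by_cases hx : x = a
    · subst hx; simp
    · simp [hx, Ne.symm hx]

lemma pvMaskOf_lt (n : Nat) : ∀ (p : List Nat), (∀ x ∈ p, x < n) → pvMaskOf p < 2 ^ n := by
  intro p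
  induction p with
  | nil => intro _; exact Nat.two_pow_pos n
  | cons a p ih =>
    intro h
    show (pvMaskOf p) ||| 1 <<< a < 2 ^ n
    apply Nat.or_lt_two_pow
    · exact ih (fun x hx => h x (List.mem_cons_of_mem a hx))
    · rw [Nat.one_shiftLeft]
      exact Nat.pow_lt_pow_right one_lt_two (h a List.mem_cons_self)

lemma pvCntQW_zero (A : List (List Int)) (n S k u : Nat) (h : S.testBit u = false) :
    pvCnt (pvWalks A n k) (pvQW S u) = 0 := by
  apply pvCnt_false
  intro p hp
  unfold pvQW
  by_cases hh : p.headI = u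
  · have hne : p ≠ [] := by
      intro he
      have := (pvWalks_shape A n k p hp).1
      rw [he] at this; simp at this
    have hmem := pvHeadI_mem p hne
    rw [hh] at hmem
    have hall : p.all (fun x => S.testBit x) = false := by
      rw [List.all_eq_false]
      exact ⟨u, hmem, by simp [h]⟩
    simp [hall]
  · simp [hh]

------------------------------------------------------------------------------
-- B's iteration computes walk counts per endpoint
------------------------------------------------------------------------------

lemma pvGetD_map_range (g : Nat → Int) (n u : Nat) (h : u < n) :
    ((List.range n).map g).getD u 0 = g u := by
  rw [List.getD_eq_getElem?_getD]
  simp [List.getElem?_map, List.getElem?_range, h]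

lemma pvInvW (A : List (List Int)) (n S : Nat) : ∀ (k : Nat),
    (List.range k).foldl (fun w _ => pvWStep A n S w) (pvW0 n S)
      = (List.range n).map (fun v => pvCnt (pvWalks A n k) (pvQW S v)) := by
  intro k
  induction k with
  | zero =>
    simp only [List.range_zero, List.foldl_nil]
    unfold pvW0
    apply List.map_congr_left
    intro v hv
    have hv' := List.mem_range.1 hv
    show (if S.testBit v then (1:Int) else 0) = _
    unfold pvCnt pvWalks
    rw [List.map_map]
    have hcomp : ((fun p => if pvQW S v p then (1:Int) else 0) ∘ fun u => [u])
        = fun u => if (u == v) && S.testBit u then (1:Int) else 0 := by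
      funext u
      simp [pvQW, List.headI]
    rw [hcomp, pvIndSumRange]
    by_cases hb : S.testBit v = true
    · simp [hb, hv']
    · simp [hb]
  | succ k ih =>
    rw [List.range_succ, List.foldl_append, List.foldl_cons, List.foldl_nil, ih]
    unfold pvWStep
    apply List.map_congr_left
    intro v hv
    have hv' := List.mem_range.1 hv
    by_cases hb : S.testBit v = true
    · rw [if_pos hb]
      rw [pvFoldlIf (fun u => u ≠ v ∧ S.testBit u = true ∧ (A.getD u []).getD v 0 = 1)
        (fun u => ((List.range n).map (fun v => pvCnt (pvWalks A n k) (pvQW S v))).getD u 0), zero_add]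
      have hL : ∀ u ∈ List.range n,
          (if u ≠ v ∧ S.testBit u = true ∧ (A.getD u []).getD v 0 = 1 then
            ((List.range n).map (fun v => pvCnt (pvWalks A n k) (pvQW S v))).getD u 0 else 0)
          = (if u ≠ v ∧ S.testBit u = true ∧ (A.getD u []).getD v 0 = 1 then
              pvCnt (pvWalks A n k) (pvQW S u) else 0) := by
        intro u hu
        rw [pvGetD_map_range _ _ _ (List.mem_range.1 hu)]
      rw [List.map_congr_left hL, pvSumRange]
      have hdrop : ∀ u ∈ Finset.range n,
          (if u ≠ v ∧ S.testBit u = true ∧ (A.getD u []).getD v 0 = 1 then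
              pvCnt (pvWalks A n k) (pvQW S u) else 0)
          = (if u ≠ v ∧ (A.getD u []).getD v 0 = 1 then pvCnt (pvWalks A n k) (pvQW S u) else 0) := by
        intro u _
        by_cases hbu : S.testBit u = true
        · by_cases hcc : u ≠ v ∧ (A.getD u []).getD v 0 = 1
          · rw [if_pos ⟨hcc.1, hbu, hcc.2⟩, if_pos hcc]
          · rw [if_neg (by tauto), if_neg hcc]
        · have hbu' : S.testBit u = false := by cases h : S.testBit u; rfl; exact absurd h hbu
          rw [if_neg (by tauto), pvCntQW_zero A n S k u hbu']
          simp
      rw [Finset.sum_congr rfl hdrop]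
      show _ = pvCnt (pvWalks A n (k+1)) (pvQW S v)
      rw [show pvWalks A n (k+1) = (pvWalks A n k).flatMap (fun p =>
          ((List.range n).filter (fun x => decide (p.headI ≠ x) && decide ((A.getD p.headI []).getD x 0 = 1))).map
            (fun x => x :: p)) from rfl]
      rw [pvCnt_flatMap]
      have hper : ∀ p ∈ pvWalks A n k,
          pvCnt (((List.range n).filter (fun x => decide (p.headI ≠ x) && decide ((A.getD p.headI []).getD x 0 = 1))).map (fun x => x :: p)) (pvQW S v)
          = (if (p.headI ≠ v ∧ (A.getD p.headI []).getD v 0 = 1) ∧ p.all (fun x => S.testBit x) = true then (1:Int) else 0) := by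
        intro p hp
        unfold pvCnt
        rw [List.map_map]
        have hcomp : ((fun r => if pvQW S v r then (1:Int) else 0) ∘ fun x => x :: p)
            = fun x => if (x == v) && (S.testBit x && p.all (fun y => S.testBit y)) then (1:Int) else 0 := by
          funext x
          simp [pvQW, List.headI]
        rw [hcomp, pvFilterIndSum (fun x => decide (p.headI ≠ x) && decide ((A.getD p.headI []).getD x 0 = 1))
          (fun x => (x == v) && (S.testBit x && p.all (fun y => S.testBit y)))]
        have hre : ∀ x ∈ List.range n,
            (if (decide (p.headI ≠ x) && decide ((A.getD p.headI []).getD x 0 = 1)) &&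
                ((x == v) && (S.testBit x && p.all (fun y => S.testBit y))) then (1:Int) else 0)
            = (if (x == v) && ((decide (p.headI ≠ x) && decide ((A.getD p.headI []).getD x 0 = 1)) &&
                (S.testBit x && p.all (fun y => S.testBit y))) then (1:Int) else 0) := by
          intro x _
          congr 1
          cases hxy : (x == v) <;> cases h1 : decide (p.headI ≠ x) <;> simp [hxy, h1]
        rw [List.map_congr_left hre, pvIndSumRange
          (fun x => (decide (p.headI ≠ x) && decide ((A.getD p.headI []).getD x 0 = 1)) &&
                (S.testBit x && p.all (fun y => S.testBit y))) v n]
        by_cases hcnd : (p.headI ≠ v ∧ (A.getD p.headI []).getD v 0 = 1) ∧ p.all (fun x => S.testBit x) = true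
        · rw [if_pos hcnd, if_pos]
          refine ⟨hv', ?_⟩
          simp only [Bool.and_eq_true, decide_eq_true_eq]
          exact ⟨⟨hcnd.1.1, hcnd.1.2⟩, hb, hcnd.2⟩
        · rw [if_neg hcnd, if_neg]
          rintro ⟨_, hband⟩
          apply hcnd
          simp only [Bool.and_eq_true, decide_eq_true_eq] at hband
          exact ⟨⟨hband.1.1, hband.1.2⟩, hband.2.2⟩
      rw [List.map_congr_left hper]
      have hgroup := pvCnt_partition n (pvWalks A n k) (fun p hp => pvWalks_headI_lt A n k p hp)
        (fun p => decide (p.headI ≠ v) && decide ((A.getD p.headI []).getD v 0 = 1) && p.all (fun x => S.testBit x))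
      have hsum : ∀ u ∈ Finset.range n,
          pvCnt (pvWalks A n k) (fun p => (p.headI == u) &&
            (decide (p.headI ≠ v) && decide ((A.getD p.headI []).getD v 0 = 1) && p.all (fun x => S.testBit x)))
          = (if u ≠ v ∧ (A.getD u []).getD v 0 = 1 then pvCnt (pvWalks A n k) (pvQW S u) else 0) := by
        intro u _
        by_cases hcc : u ≠ v ∧ (A.getD u []).getD v 0 = 1
        · rw [if_pos hcc]
          apply pvCnt_congr
          intro p _
          unfold pvQW
          by_cases hh : p.headI = u
          · have d1 : decide (p.headI ≠ v) = true := by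
              rw [hh]; exact decide_eq_true hcc.1
            have d2 : decide ((A.getD p.headI []).getD v 0 = 1) = true := by
              rw [hh]; exact decide_eq_true hcc.2
            rw [d1, d2]
            simp
          · have hbq : (p.headI == u) = false := by rw [beq_eq_false_iff_ne]; exact hh
            rw [hbq]
            simp
        · rw [if_neg hcc]
          apply pvCnt_false
          intro p _
          by_cases hh : p.headI = u
          · rcases (not_and_or.1 hcc) with h1 | h1
            · have huv : u = v := by tauto
              subst huv
              have d1 : decide (p.headI ≠ u) = false := decide_eq_false (not_not_intro hh)
              rw [d1]
              simp
            · have d2 : decide ((A.getD p.headI []).getD v 0 = 1) = false := by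
                rw [hh]; exact decide_eq_false h1
              rw [d2]
              simp
          · have hbq : (p.headI == u) = false := by rw [beq_eq_false_iff_ne]; exact hh
            rw [hbq]
            rfl
      have hconv : (List.map (fun a =>
          if (a.headI ≠ v ∧ (A.getD a.headI []).getD v 0 = 1) ∧ (a.all fun x => S.testBit x) = true
            then (1:Int) else 0) (pvWalks A n k)).sum
          = pvCnt (pvWalks A n k) (fun p => decide (p.headI ≠ v) && decide ((A.getD p.headI []).getD v 0 = 1) &&
              p.all (fun x => S.testBit x)) := by
        unfold pvCnt
        congr 1
        apply List.map_congr_left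
        intro p _
        have hiff : ((p.headI ≠ v ∧ (A.getD p.headI []).getD v 0 = 1) ∧ (p.all fun x => S.testBit x) = true)
            ↔ ((decide (p.headI ≠ v) && decide ((A.getD p.headI []).getD v 0 = 1) &&
              p.all (fun x => S.testBit x)) = true) := by
          simp only [Bool.and_eq_true, decide_eq_true_eq]
        rw [if_congr hiff rfl rfl]
      rw [hconv, ← hgroup, Finset.sum_congr rfl hsum]
    · have hb' : S.testBit v = false := by cases h : S.testBit v; rfl; exact absurd h hb
      rw [if_neg hb, pvCntQW_zero A n S (k+1) v hb']

------------------------------------------------------------------------------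
-- pvBits (popcount) facts
------------------------------------------------------------------------------

lemma pvBits_eq' (m : Nat) : pvBits m = m % 2 + pvBits (m / 2) := by
  by_cases h : m = 0
  · subst h
    simp [pvBits]
  · rw [pvBits]
    simp [h]

lemma pvBits_zero : pvBits 0 = 0 := by simp [pvBits]

lemma pvBits_zero_iff : ∀ (m : Nat), pvBits m = 0 → m = 0 := by
  intro m
  induction m using Nat.strong_induction_on with
  | _ m ih =>
    intro h
    rw [pvBits_eq'] at h
    by_cases hm : m = 0
    · exact hm
    · have h1 : m % 2 = 0 := by omega
      have h2 : pvBits (m / 2) = 0 := by omega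
      have h3 : m / 2 = 0 := ih (m / 2) (Nat.div_lt_self (Nat.pos_of_ne_zero hm) one_lt_two) h2
      omega

lemma pvBits_le : ∀ (n S : Nat), S < 2 ^ n → pvBits S ≤ n := by
  intro n
  induction n with
  | zero =>
    intro S h
    interval_cases S
    simp [pvBits_zero]
  | succ n ih =>
    intro S h
    rw [pvBits_eq']
    have h2 : 2 ^ (n + 1) = 2 * 2 ^ n := by ring
    have hlt : S / 2 < 2 ^ n := by omega
    have := ih (S / 2) hlt
    omega

lemma pvBits_add_pow : ∀ (n S : Nat), S < 2 ^ n → pvBits (2 ^ n + S) = pvBits S + 1 := by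
  intro n
  induction n with
  | zero =>
    intro S h
    interval_cases S
    rw [pvBits_eq']
    norm_num [pvBits_zero]
  | succ n ih =>
    intro S h
    rw [pvBits_eq' (2 ^ (n+1) + S), pvBits_eq' S]
    have h2 : 2 ^ (n + 1) = 2 * 2 ^ n := by ring
    have hmod : (2 ^ (n+1) + S) % 2 = S % 2 := by omega
    have hdiv : (2 ^ (n+1) + S) / 2 = 2 ^ n + S / 2 := by omega
    have hlt : S / 2 < 2 ^ n := by omega
    rw [hmod, hdiv, ih (S / 2) hlt]
    omega

lemma pvBits_shift : ∀ (v : Nat), pvBits (1 <<< v) = 1 := by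
  intro v
  induction v with
  | zero =>
    rw [show (1 : Nat) <<< 0 = 1 from rfl, pvBits_eq']
    norm_num [pvBits_zero]
  | succ v ih =>
    have h : (1 : Nat) <<< (v + 1) = 2 * (1 <<< v) := by
      rw [Nat.one_shiftLeft, Nat.one_shiftLeft, Nat.pow_succ]; ring
    rw [h, pvBits_eq']
    have h1 : 2 * ((1 : Nat) <<< v) % 2 = 0 := by omega
    have h2 : 2 * ((1 : Nat) <<< v) / 2 = 1 <<< v := by omega
    rw [h1, h2, ih]

lemma pvDivXor (m v : Nat) : (m ^^^ 1 <<< (v + 1)) / 2 = m / 2 ^^^ 1 <<< v := by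
  apply Nat.eq_of_testBit_eq
  intro i
  rw [← Nat.testBit_add_one, Nat.testBit_xor, Nat.testBit_xor, ← Nat.testBit_add_one,
    Nat.one_shiftLeft, Nat.one_shiftLeft, Nat.testBit_two_pow, Nat.testBit_two_pow]
  congr 1
  exact decide_eq_decide.mpr (by omega)

lemma pvModXor (m v : Nat) : (m ^^^ 1 <<< (v + 1)) % 2 = m % 2 := by
  have h0 : (m ^^^ 1 <<< (v + 1)).testBit 0 = m.testBit 0 := by
    rw [Nat.testBit_xor, Nat.one_shiftLeft, Nat.testBit_two_pow]
    simp
  rw [Nat.testBit_zero, Nat.testBit_zero] at h0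
  have hiff := decide_eq_decide.mp h0
  by_cases hp : m % 2 = 1
  · have := hiff.mpr hp
    omega
  · have hq : ¬ ((m ^^^ 1 <<< (v + 1)) % 2 = 1) := fun hx => hp (hiff.mp hx)
    omega

lemma pvBits_xor : ∀ (v m : Nat), m.testBit v = true → pvBits m = pvBits (m ^^^ 1 <<< v) + 1 := by
  intro v
  induction v with
  | zero =>
    intro m h
    have hm : m % 2 = 1 := by
      rw [Nat.testBit_zero] at h
      exact of_decide_eq_true h
    have hdiv : (m ^^^ 1 <<< 0) / 2 = m / 2 := by
      apply Nat.eq_of_testBit_eq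
      intro i
      rw [← Nat.testBit_add_one, ← Nat.testBit_add_one, Nat.testBit_xor,
        Nat.one_shiftLeft, Nat.testBit_two_pow]
      simp
    have hmod : (m ^^^ 1 <<< 0) % 2 = 0 := by
      have h0 : (m ^^^ 1 <<< 0).testBit 0 = !(m.testBit 0) := by
        rw [Nat.testBit_xor, Nat.one_shiftLeft, Nat.testBit_two_pow]
        simp
      rw [Nat.testBit_zero, Nat.testBit_zero] at h0
      rw [Nat.testBit_zero] at h
      rw [h] at h0
      have hq : ¬ ((m ^^^ 1 <<< 0) % 2 = 1) := by
        intro hx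
        rw [hx] at h0
        simp at h0
      omega
    rw [pvBits_eq' m, pvBits_eq' (m ^^^ 1 <<< 0), hdiv, hmod, hm]
    omega
  | succ v ih =>
    intro m h
    have h' : (m / 2).testBit v = true := by rw [← Nat.testBit_add_one]; exact h
    rw [pvBits_eq' m, pvBits_eq' (m ^^^ 1 <<< (v+1)), pvDivXor, pvModXor, ih (m / 2) h']
    omega

lemma pvBits_pow_sub_one : ∀ (n : Nat), pvBits (2 ^ n - 1) = n := by
  intro n
  induction n with
  | zero => simpa using pvBits_zero
  | succ n ih =>
    rw [pvBits_eq']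
    have h2 : 2 ^ (n + 1) = 2 * 2 ^ n := by ring
    have hp : 1 ≤ 2 ^ n := Nat.one_le_two_pow
    have hmod : (2 ^ (n+1) - 1) % 2 = 1 := by omega
    have hdiv : (2 ^ (n+1) - 1) / 2 = 2 ^ n - 1 := by omega
    rw [hmod, hdiv, ih]
    omega

------------------------------------------------------------------------------
-- the alternating-sum identity (inclusion-exclusion kernel)
------------------------------------------------------------------------------

lemma pvBitHigh {x n i : Nat} (h : x < 2 ^ n) (hi : n ≤ i) : x.testBit i = false :=
  Nat.testBit_lt_two_pow (lt_of_lt_of_le h (Nat.pow_le_pow_right (by norm_num) hi))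

lemma pvAndEq_iff (T S : Nat) : T &&& S = T ↔ ∀ i, T.testBit i = true → S.testBit i = true := by
  constructor
  · intro h i hi
    have h2 := congrArg (fun x => Nat.testBit x i) h
    simp only [Nat.testBit_and] at h2
    rw [hi] at h2
    simpa using h2
  · intro h
    apply Nat.eq_of_testBit_eq
    intro i
    rw [Nat.testBit_and]
    cases ht : T.testBit i
    · simp
    · simp [h i ht]

lemma pvBitAdd {n S₀ : Nat} (h : S₀ < 2 ^ n) (i : Nat) :
    (2 ^ n + S₀).testBit i = if i < n then S₀.testBit i else decide (i = n) := by
  rcases lt_trichotomy i n with hi | rfl | hi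
  · rw [if_pos hi, Nat.testBit_two_pow_add_gt hi]
  · rw [if_neg (by omega)]
    rw [Nat.testBit_two_pow_add_eq, pvBitHigh h (le_refl _)]
    simp
  · rw [if_neg (by omega)]
    have hlt : 2 ^ n + S₀ < 2 ^ (n + 1) := by
      have h2 : 2 ^ (n + 1) = 2 * 2 ^ n := by ring
      omega
    rw [pvBitHigh hlt (by omega)]
    simp
    omega

lemma pvAltSum : ∀ (n T : Nat), T < 2 ^ n →
    (∑ S ∈ Finset.range (2 ^ n), (-1 : Int) ^ (n - pvBits S) * (if T &&& S = T then 1 else 0))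
      = if T = 2 ^ n - 1 then 1 else 0 := by
  intro n
  induction n with
  | zero =>
    intro T h
    interval_cases T
    simp [pvBits_zero]
  | succ n ih =>
    intro T h
    have h2 : 2 ^ (n + 1) = 2 ^ n + 2 ^ n := by ring
    rw [h2, Finset.range_eq_Ico, ← Finset.sum_Ico_consecutive _ (Nat.zero_le (2^n)) (by omega)]
    rw [show Finset.Ico 0 (2 ^ n) = Finset.range (2 ^ n) by rw [Finset.range_eq_Ico]]
    rw [Finset.sum_Ico_eq_sum_range,
      show 2 ^ n + 2 ^ n - 2 ^ n = 2 ^ n by omega]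
    by_cases hb : T.testBit n = true
    · -- T has bit n: only the upper half contributes
      have hge : 2 ^ n ≤ T := by
        by_contra hlt
        rw [pvBitHigh (by omega : T < 2 ^ n) (le_refl n)] at hb
        exact Bool.false_ne_true hb
      set T' := T - 2 ^ n with hT'
      have hTeq : T = 2 ^ n + T' := by omega
      have hT'lt : T' < 2 ^ n := by omega
      have hfirst : ∀ S ∈ Finset.range (2 ^ n),
          (-1 : Int) ^ (n + 1 - pvBits S) * (if T &&& S = T then 1 else 0) = 0 := by
        intro S hS
        have hS' := Finset.mem_range.1 hS
        rw [if_neg, mul_zero]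
        intro hsub
        have hx := (pvAndEq_iff T S).1 hsub n hb
        rw [pvBitHigh hS' (le_refl n)] at hx
        exact Bool.false_ne_true hx
      rw [Finset.sum_congr rfl hfirst, Finset.sum_const_zero, zero_add]
      have hsecond : ∀ S₀ ∈ Finset.range (2 ^ n),
          (-1 : Int) ^ (n + 1 - pvBits (2 ^ n + S₀)) * (if T &&& (2 ^ n + S₀) = T then 1 else 0)
          = (-1 : Int) ^ (n - pvBits S₀) * (if T' &&& S₀ = T' then 1 else 0) := by
        intro S₀ hS₀
        have hS₀' := Finset.mem_range.1 hS₀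
        rw [pvBits_add_pow n S₀ hS₀']
        have hexp : n + 1 - (pvBits S₀ + 1) = n - pvBits S₀ := by omega
        rw [hexp]
        congr 1
        have hcond : (T &&& (2 ^ n + S₀) = T) ↔ (T' &&& S₀ = T') := by
          rw [pvAndEq_iff, pvAndEq_iff]
          constructor
          · intro hh i hi
            have hin : i < n := by
              by_contra hge2
              rw [pvBitHigh hT'lt (by omega)] at hi
              exact Bool.false_ne_true hi
            have hTi : T.testBit i = true := by
              rw [hTeq, pvBitAdd hT'lt, if_pos hin]
              exact hi
            have hx := hh i hTi
            rw [pvBitAdd hS₀' i, if_pos hin] at hx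
            exact hx
          · intro hh i hi
            rw [pvBitAdd hS₀' i]
            by_cases hin : i < n
            · rw [if_pos hin]
              apply hh
              rw [hTeq, pvBitAdd hT'lt, if_pos hin] at hi
              exact hi
            · rw [if_neg hin]
              have hile : i ≤ n := by
                by_contra hgt
                rw [pvBitHigh h (by omega)] at hi
                exact Bool.false_ne_true hi
              simp
              omega
        rw [if_congr hcond rfl rfl]
      rw [Finset.sum_congr rfl hsecond, ih T' hT'lt]
      have hiff : (T' = 2 ^ n - 1) ↔ (T = 2 ^ (n+1) - 1) := by
        constructor <;> intro hh <;> omega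
      rw [if_congr hiff rfl rfl, h2]
    · -- bit n of T is clear: the two halves cancel
      have hb' : T.testBit n = false := by cases hx : T.testBit n; rfl; exact absurd hx hb
      have hTlt : T < 2 ^ n := by
        by_contra hge
        have hTeq : T = 2 ^ n + (T - 2 ^ n) := by omega
        have hT'lt : T - 2 ^ n < 2 ^ n := by omega
        rw [hTeq, pvBitAdd hT'lt, if_neg (by omega)] at hb'
        simp at hb'
      have hfirst : ∀ S ∈ Finset.range (2 ^ n),
          (-1 : Int) ^ (n + 1 - pvBits S) * (if T &&& S = T then 1 else 0)
          = -((-1 : Int) ^ (n - pvBits S) * (if T &&& S = T then 1 else 0)) := by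
        intro S hS
        have hS' := Finset.mem_range.1 hS
        have hle := pvBits_le n S hS'
        have hexp : n + 1 - pvBits S = (n - pvBits S) + 1 := by omega
        rw [hexp, pow_succ]
        ring
      have hsecond : ∀ S₀ ∈ Finset.range (2 ^ n),
          (-1 : Int) ^ (n + 1 - pvBits (2 ^ n + S₀)) * (if T &&& (2 ^ n + S₀) = T then 1 else 0)
          = (-1 : Int) ^ (n - pvBits S₀) * (if T &&& S₀ = T then 1 else 0) := by
        intro S₀ hS₀
        have hS₀' := Finset.mem_range.1 hS₀
        rw [pvBits_add_pow n S₀ hS₀']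
        have hexp : n + 1 - (pvBits S₀ + 1) = n - pvBits S₀ := by omega
        rw [hexp]
        congr 1
        have hcond : (T &&& (2 ^ n + S₀) = T) ↔ (T &&& S₀ = T) := by
          rw [pvAndEq_iff, pvAndEq_iff]
          constructor
          · intro hh i hi
            have hin : i < n := by
              by_contra hge2
              rw [pvBitHigh hTlt (by omega)] at hi
              exact Bool.false_ne_true hi
            have hx := hh i hi
            rw [pvBitAdd hS₀' i, if_pos hin] at hx
            exact hx
          · intro hh i hi
            have hin : i < n := by
              by_contra hge2
              rw [pvBitHigh hTlt (by omega)] at hi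
              exact Bool.false_ne_true hi
            rw [pvBitAdd hS₀' i, if_pos hin]
            exact hh i hi
        rw [if_congr hcond rfl rfl]
      rw [Finset.sum_congr rfl hfirst, Finset.sum_congr rfl hsecond,
        Finset.sum_neg_distrib, ih T hTlt]
      have hne : ¬ (T = 2 ^ n + 2 ^ n - 1) := by
        have hp : 1 ≤ 2 ^ n := Nat.one_le_two_pow
        omega
      rw [if_neg hne]
      ring

------------------------------------------------------------------------------
-- pvF counts nodup walks with vertex set exactly m
------------------------------------------------------------------------------

lemma pvFwalks (A : List (List Int)) (n : Nat) : ∀ (k m v : Nat), pvBits m = k + 1 →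
    pvF A n m v = pvCnt (pvWalks A n k) (pvQF m v) := by
  intro k
  induction k with
  | zero =>
    intro m v hm
    by_cases hg : v < n ∧ m.testBit v = true
    · have hmv : m = 1 <<< v := by
        have h0 : pvBits (m ^^^ 1 <<< v) = 0 := by
          have := pvBits_xor v m hg.2
          omega
        have hz := pvBits_zero_iff _ h0
        have h2 := pvXorOrCancel hg.2
        rw [hz] at h2
        simp at h2
        exact h2.symm
      rw [pvF, dif_pos hg, if_pos hmv]
      unfold pvCnt pvWalks
      rw [List.map_map]
      have hcomp : ((fun p => if pvQF m v p then (1:Int) else 0) ∘ fun u => [u])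
          = fun u => if (u == v) && (pvMaskOf [u] == m) then (1:Int) else 0 := by
        funext u
        have hq : pvQF m v [u] = ((u == v) && (pvMaskOf [u] == m)) := by
          simp [pvQF, List.headI]
        rw [Function.comp_apply, hq]
      rw [hcomp]
      have hfun : ∀ u ∈ List.range n,
          (if (u == v) && (pvMaskOf [u] == m) then (1:Int) else 0)
          = (if (u == v) && true then (1:Int) else 0) := by
        intro u hu
        by_cases huv : u = v
        · subst huv
          have hmm : pvMaskOf [u] = m := by
            show 0 ||| 1 <<< u = m
            rw [hmv]; simp
          simp [hmm]
        · simp [huv]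
      rw [List.map_congr_left hfun, pvIndSumRange (fun _ => true) v n, if_pos ⟨hg.1, rfl⟩]
    · rw [pvF, dif_neg hg]
      symm
      apply pvCnt_false
      intro p hp
      obtain ⟨hlen, hmem⟩ := pvWalks_shape A n 0 p hp
      unfold pvQF
      by_cases hh : p.headI = v
      · have hne : p ≠ [] := by intro he; rw [he] at hlen; simp at hlen
        have hv : v < n := by rw [← hh]; exact hmem _ (pvHeadI_mem p hne)
        by_cases hmo : pvMaskOf p = m
        · exfalso
          apply hg
          refine ⟨hv, ?_⟩
          rw [← hmo, pvTestBit_maskOf, ← hh]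
          simp [pvHeadI_mem p hne]
        · simp [hh, hmo]
      · simp [hh]
  | succ k ih =>
    intro m v hm
    by_cases hg : v < n ∧ m.testBit v = true
    · have hne1 : m ≠ 1 <<< v := by
        intro he
        rw [he, pvBits_shift] at hm
        omega
      rw [pvF, dif_pos hg, if_neg hne1]
      have hmxor : pvBits (m ^^^ 1 <<< v) = k + 1 := by
        have := pvBits_xor v m hg.2
        omega
      rw [pvFoldlIf (fun u => u ≠ v ∧ m.testBit u = true ∧ (A.getD u []).getD v 0 = 1)
        (fun u => pvF A n (m ^^^ 1 <<< v) u), zero_add]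
      have hL : ∀ u ∈ List.range n,
          (if u ≠ v ∧ m.testBit u = true ∧ (A.getD u []).getD v 0 = 1 then pvF A n (m ^^^ 1 <<< v) u else 0)
          = (if u ≠ v ∧ m.testBit u = true ∧ (A.getD u []).getD v 0 = 1 then
              pvCnt (pvWalks A n k) (pvQF (m ^^^ 1 <<< v) u) else 0) := by
        intro u hu
        by_cases hc : u ≠ v ∧ m.testBit u = true ∧ (A.getD u []).getD v 0 = 1
        · rw [if_pos hc, if_pos hc, ih (m ^^^ 1 <<< v) u hmxor]
        · rw [if_neg hc, if_neg hc]
      rw [List.map_congr_left hL, pvSumRange]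
      have hdrop : ∀ u ∈ Finset.range n,
          (if u ≠ v ∧ m.testBit u = true ∧ (A.getD u []).getD v 0 = 1 then
              pvCnt (pvWalks A n k) (pvQF (m ^^^ 1 <<< v) u) else 0)
          = (if u ≠ v ∧ (A.getD u []).getD v 0 = 1 then
              pvCnt (pvWalks A n k) (pvQF (m ^^^ 1 <<< v) u) else 0) := by
        intro u _
        by_cases hbu : m.testBit u = true
        · by_cases hcc : u ≠ v ∧ (A.getD u []).getD v 0 = 1
          · rw [if_pos ⟨hcc.1, hbu, hcc.2⟩, if_pos hcc]
          · rw [if_neg (by tauto), if_neg hcc]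
        · have hbu' : m.testBit u = false := by cases hx : m.testBit u; rfl; exact absurd hx hbu
          rw [if_neg (by tauto)]
          by_cases hcc : u ≠ v ∧ (A.getD u []).getD v 0 = 1
          · rw [if_pos hcc]
            symm
            apply pvCnt_false
            intro p hp
            unfold pvQF
            by_cases hh : p.headI = u
            · obtain ⟨hlen, _⟩ := pvWalks_shape A n k p hp
              have hnep : p ≠ [] := by intro he; rw [he] at hlen; simp at hlen
              by_cases hmo : pvMaskOf p = m ^^^ 1 <<< v
              · exfalso
                have hbit : (pvMaskOf p).testBit u = true := by
                  rw [pvTestBit_maskOf, ← hh]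
                  simp [pvHeadI_mem p hnep]
                rw [hmo, pvTestBitXorShift, if_neg (by tauto), hbu'] at hbit
                exact Bool.false_ne_true hbit
              · simp [hh, hmo]
            · simp [hh]
          · rw [if_neg hcc]
      rw [Finset.sum_congr rfl hdrop]
      rw [show pvWalks A n (k+1) = (pvWalks A n k).flatMap (fun p =>
          ((List.range n).filter (fun x => decide (p.headI ≠ x) && decide ((A.getD p.headI []).getD x 0 = 1))).map
            (fun x => x :: p)) from rfl]
      rw [pvCnt_flatMap]
      have hper : ∀ p ∈ pvWalks A n k,
          pvCnt (((List.range n).filter (fun x => decide (p.headI ≠ x) && decide ((A.getD p.headI []).getD x 0 = 1))).map (fun x => x :: p)) (pvQF m v)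
          = (if (p.headI ≠ v ∧ (A.getD p.headI []).getD v 0 = 1) ∧
              ((pvMaskOf p == m ^^^ 1 <<< v) && decide p.Nodup) = true then (1:Int) else 0) := by
        intro p hp
        unfold pvCnt
        rw [List.map_map]
        have hq : ∀ x, pvQF m v (x :: p)
            = ((x == v) && (((pvMaskOf p ||| 1 <<< x) == m) && (decide (¬ x ∈ p) && decide p.Nodup))) := by
          intro x
          unfold pvQF
          have h3 : decide (x :: p).Nodup = (decide (¬ x ∈ p) && decide p.Nodup) := by
            by_cases ha : x ∈ p <;> by_cases hb2 : p.Nodup <;> simp [List.nodup_cons, ha, hb2]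
          rw [show pvMaskOf (x :: p) = pvMaskOf p ||| 1 <<< x from rfl, h3,
            show (x :: p).headI = x from rfl]
        have hcomp : ((fun r => if pvQF m v r then (1:Int) else 0) ∘ fun x => x :: p)
            = fun x => if ((x == v) && (((pvMaskOf p ||| 1 <<< x) == m) && (decide (¬ x ∈ p) && decide p.Nodup))) then (1:Int) else 0 := by
          funext x
          rw [Function.comp_apply, hq x]
        rw [hcomp, pvFilterIndSum (fun x => decide (p.headI ≠ x) && decide ((A.getD p.headI []).getD x 0 = 1))
          (fun x => (x == v) && (((pvMaskOf p ||| 1 <<< x) == m) && (decide (¬ x ∈ p) && decide p.Nodup)))]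
        have hre : ∀ x ∈ List.range n,
            (if (decide (p.headI ≠ x) && decide ((A.getD p.headI []).getD x 0 = 1)) &&
                ((x == v) && (((pvMaskOf p ||| 1 <<< x) == m) && (decide (¬ x ∈ p) && decide p.Nodup))) then (1:Int) else 0)
            = (if (x == v) && ((decide (p.headI ≠ x) && decide ((A.getD p.headI []).getD x 0 = 1)) &&
                (((pvMaskOf p ||| 1 <<< x) == m) && (decide (¬ x ∈ p) && decide p.Nodup))) then (1:Int) else 0) := by
          intro x _
          congr 1
          cases hxy : (x == v) <;> cases hd1 : decide (p.headI ≠ x) <;> simp [hxy, hd1]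
        rw [List.map_congr_left hre, pvIndSumRange
          (fun x => (decide (p.headI ≠ x) && decide ((A.getD p.headI []).getD x 0 = 1)) &&
            (((pvMaskOf p ||| 1 <<< x) == m) && (decide (¬ x ∈ p) && decide p.Nodup))) v n]
        by_cases hcnd : (p.headI ≠ v ∧ (A.getD p.headI []).getD v 0 = 1) ∧
            ((pvMaskOf p == m ^^^ 1 <<< v) && decide p.Nodup) = true
        · rw [if_pos hcnd, if_pos]
          refine ⟨hg.1, ?_⟩
          simp only [Bool.and_eq_true, beq_iff_eq, decide_eq_true_eq] at hcnd ⊢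
          obtain ⟨⟨hha, hhb⟩, hmo, hnd⟩ := hcnd
          have hvnotp : ¬ v ∈ p := by
            intro hvp
            have hbit : (pvMaskOf p).testBit v = true := by
              rw [pvTestBit_maskOf]; simp [hvp]
            rw [hmo, pvTestBitXorShift, if_pos rfl, hg.2] at hbit
            simp at hbit
          exact ⟨⟨hha, hhb⟩, by rw [hmo, pvXorOrCancel hg.2], hvnotp, hnd⟩
        · rw [if_neg hcnd, if_neg]
          rintro ⟨_, hband⟩
          apply hcnd
          simp only [Bool.and_eq_true, beq_iff_eq, decide_eq_true_eq] at hband ⊢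
          obtain ⟨⟨hha, hhb⟩, hmo, hvnotp, hnd⟩ := hband
          have hbitv : (pvMaskOf p).testBit v = false := by
            rw [pvTestBit_maskOf]
            simp [hvnotp]
          refine ⟨⟨hha, hhb⟩, ?_, hnd⟩
          rw [← hmo, pvOrXorCancel hbitv]
      rw [List.map_congr_left hper]
      have hgroup := pvCnt_partition n (pvWalks A n k) (fun p hp => pvWalks_headI_lt A n k p hp)
        (fun p => decide (p.headI ≠ v) && decide ((A.getD p.headI []).getD v 0 = 1) &&
          ((pvMaskOf p == m ^^^ 1 <<< v) && decide p.Nodup))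
      have hsum : ∀ u ∈ Finset.range n,
          pvCnt (pvWalks A n k) (fun p => (p.headI == u) &&
            (decide (p.headI ≠ v) && decide ((A.getD p.headI []).getD v 0 = 1) &&
              ((pvMaskOf p == m ^^^ 1 <<< v) && decide p.Nodup)))
          = (if u ≠ v ∧ (A.getD u []).getD v 0 = 1 then
              pvCnt (pvWalks A n k) (pvQF (m ^^^ 1 <<< v) u) else 0) := by
        intro u _
        by_cases hcc : u ≠ v ∧ (A.getD u []).getD v 0 = 1
        · rw [if_pos hcc]
          apply pvCnt_congr
          intro p _
          unfold pvQF
          by_cases hh : p.headI = u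
          · have d1 : decide (p.headI ≠ v) = true := by
              rw [hh]; exact decide_eq_true hcc.1
            have d2 : decide ((A.getD p.headI []).getD v 0 = 1) = true := by
              rw [hh]; exact decide_eq_true hcc.2
            rw [d1, d2]
            simp
          · have hbq : (p.headI == u) = false := by rw [beq_eq_false_iff_ne]; exact hh
            rw [hbq]
            simp
        · rw [if_neg hcc]
          apply pvCnt_false
          intro p _
          by_cases hh : p.headI = u
          · rcases (not_and_or.1 hcc) with h1 | h1
            · have huv : u = v := by tauto
              subst huv
              have d1 : decide (p.headI ≠ u) = false := decide_eq_false (not_not_intro hh)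
              rw [d1]
              simp
            · have d2 : decide ((A.getD p.headI []).getD v 0 = 1) = false := by
                rw [hh]; exact decide_eq_false h1
              rw [d2]
              simp
          · have hbq : (p.headI == u) = false := by rw [beq_eq_false_iff_ne]; exact hh
            rw [hbq]
            rfl
      have hconv : (List.map (fun a =>
          if (a.headI ≠ v ∧ (A.getD a.headI []).getD v 0 = 1) ∧
              ((pvMaskOf a == m ^^^ 1 <<< v) && decide a.Nodup) = true then (1:Int) else 0)
          (pvWalks A n k)).sum
          = pvCnt (pvWalks A n k) (fun p => decide (p.headI ≠ v) && decide ((A.getD p.headI []).getD v 0 = 1) &&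
              ((pvMaskOf p == m ^^^ 1 <<< v) && decide p.Nodup)) := by
        unfold pvCnt
        congr 1
        apply List.map_congr_left
        intro p _
        have hiff : ((p.headI ≠ v ∧ (A.getD p.headI []).getD v 0 = 1) ∧
              ((pvMaskOf p == m ^^^ 1 <<< v) && decide p.Nodup) = true)
            ↔ ((decide (p.headI ≠ v) && decide ((A.getD p.headI []).getD v 0 = 1) &&
              ((pvMaskOf p == m ^^^ 1 <<< v) && decide p.Nodup)) = true) := by
          simp only [Bool.and_eq_true, decide_eq_true_eq]
        rw [if_congr hiff rfl rfl]
      rw [hconv, ← hgroup, Finset.sum_congr rfl hsum]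
    · rw [pvF, dif_neg hg]
      symm
      apply pvCnt_false
      intro p hp
      obtain ⟨hlen, hmem⟩ := pvWalks_shape A n (k+1) p hp
      unfold pvQF
      by_cases hh : p.headI = v
      · have hne : p ≠ [] := by intro he; rw [he] at hlen; simp at hlen
        have hv : v < n := by rw [← hh]; exact hmem _ (pvHeadI_mem p hne)
        by_cases hmo : pvMaskOf p = m
        · exfalso
          apply hg
          refine ⟨hv, ?_⟩
          rw [← hmo, pvTestBit_maskOf, ← hh]
          simp [pvHeadI_mem p hne]
        · simp [hh, hmo]
      · simp [hh]

------------------------------------------------------------------------------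
-- a full-mask walk of length n is automatically nodup
------------------------------------------------------------------------------

lemma pvFullNodup (n : Nat) (p : List Nat) (hlen : p.length = n) (hmem : ∀ x ∈ p, x < n)
    (hmask : pvMaskOf p = 2 ^ n - 1) : p.Nodup := by
  have hsub : Finset.range n ⊆ p.toFinset := by
    intro i hi
    have hi' := Finset.mem_range.1 hi
    have hbit : (pvMaskOf p).testBit i = true := by
      rw [hmask, Nat.testBit_two_pow_sub_one]
      simp [hi']
    rw [pvTestBit_maskOf] at hbit
    simp only [decide_eq_true_eq] at hbit
    exact List.mem_toFinset.2 hbit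
  have hcard : n ≤ p.toFinset.card := by
    have := Finset.card_le_card hsub
    simpa using this
  have hdedup : p.dedup.length = p.length := by
    have h1 : p.toFinset.card = p.dedup.length := List.card_toFinset p
    have h2 : p.dedup.length ≤ p.length := (List.dedup_sublist p).length_le
    omega
  have heq := (List.dedup_sublist p).eq_of_length hdedup
  rw [← heq]
  exact List.nodup_dedup p

------------------------------------------------------------------------------
-- main lemmas: both programs equal the same walk count
------------------------------------------------------------------------------

lemma pvAmain (A : List (List Int)) (hn : 1 ≤ A.length) :
    ham_path_count_dp_endpoints A
      = pvCnt (pvWalks A A.length (A.length - 1))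
          (fun p => (pvMaskOf p == 2 ^ A.length - 1) && decide p.Nodup) := by
  set n := A.length with hnn
  show (List.range n).foldl (fun acc v => acc +
      pvGet ((List.range' 1 ((1 <<< n) - 1)).foldl (pvPushStep A n) (pvBase n)) ((1 <<< n) - 1) v) 0 = _
  rw [pvFoldlAdd, zero_add]
  have hfull : (1 : Nat) <<< n = 2 ^ n := Nat.one_shiftLeft n
  have hmap : ∀ v ∈ List.range n,
      pvGet ((List.range' 1 ((1 <<< n) - 1)).foldl (pvPushStep A n) (pvBase n)) ((1 <<< n) - 1) v
        = pvCnt (pvWalks A n (n - 1)) (pvQF (2 ^ n - 1) v) := by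
    intro v hv
    have hv' := List.mem_range.1 hv
    rw [pvInvA]
    have htb : ((1 <<< n) - 1).testBit v = true := by
      rw [hfull, Nat.testBit_two_pow_sub_one]
      simp [hv']
    rw [if_pos ⟨Nat.le_of_lt (pvXorLt htb), htb, hv'⟩]
    rw [pvFwalks A n (n - 1) ((1 <<< n) - 1) v (by rw [hfull, pvBits_pow_sub_one]; omega), hfull]
  rw [List.map_congr_left hmap, pvSumRange]
  exact pvCnt_partition n (pvWalks A n (n - 1)) (fun p hp => pvWalks_headI_lt A n (n-1) p hp)
    (fun p => (pvMaskOf p == 2 ^ n - 1) && decide p.Nodup)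

lemma pvBmain (A : List (List Int)) :
    ham_path_count_dp_endpoints_alt A
      = pvCnt (pvWalks A A.length (A.length - 1)) (fun p => (pvMaskOf p == 2 ^ A.length - 1)) := by
  set n := A.length with hnn
  show (List.range (1 <<< n)).foldl (fun total S => total +
      (-1 : Int) ^ (n - pvBits S) * ((List.range (n - 1)).foldl (fun w _ => pvWStep A n S w) (pvW0 n S)).sum) 0 = _
  rw [pvFoldlAdd, zero_add]
  have hfull : (1 : Nat) <<< n = 2 ^ n := Nat.one_shiftLeft n
  have hmap : ∀ S ∈ List.range (1 <<< n),
      (-1 : Int) ^ (n - pvBits S) * ((List.range (n - 1)).foldl (fun w _ => pvWStep A n S w) (pvW0 n S)).sum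
      = (-1 : Int) ^ (n - pvBits S) * pvCnt (pvWalks A n (n - 1)) (fun p => p.all (fun x => S.testBit x)) := by
    intro S _
    rw [pvInvW A n S (n - 1), pvSumRange]
    exact congrArg (fun z => (-1 : Int) ^ (n - pvBits S) * z)
      (pvCnt_partition n (pvWalks A n (n-1))
        (fun p hp => pvWalks_headI_lt A n (n-1) p hp) (fun p => p.all (fun x => S.testBit x)))
  rw [List.map_congr_left hmap, pvSumRange]
  have hexp : ∀ S ∈ Finset.range (1 <<< n),
      (-1 : Int) ^ (n - pvBits S) * pvCnt (pvWalks A n (n - 1)) (fun p => p.all (fun x => S.testBit x))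
      = ((pvWalks A n (n - 1)).map (fun p =>
          (-1 : Int) ^ (n - pvBits S) * (if pvMaskOf p &&& S = pvMaskOf p then 1 else 0))).sum := by
    intro S _
    unfold pvCnt
    rw [← List.sum_map_mul_left]
    congr 1
    apply List.map_congr_left
    intro p hp
    congr 1
    have hiff : (p.all (fun x => S.testBit x) = true) ↔ (pvMaskOf p &&& S = pvMaskOf p) := by
      rw [pvAndEq_iff, List.all_eq_true]
      constructor
      · intro hh i hi
        rw [pvTestBit_maskOf] at hi
        exact hh i (of_decide_eq_true hi)
      · intro hh x hx
        exact hh x (by rw [pvTestBit_maskOf]; simp [hx])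
    rw [if_congr hiff rfl rfl]
  rw [Finset.sum_congr rfl hexp]
  have hswap : ∀ (l : List (List Nat)) (N : Nat) (g : Nat → List Nat → Int),
      ∑ S ∈ Finset.range N, (l.map (g S)).sum = (l.map (fun p => ∑ S ∈ Finset.range N, g S p)).sum := by
    intro l N g
    induction l with
    | nil => simp
    | cons a l ih => simp [Finset.sum_add_distrib, ih]
  rw [hswap]
  unfold pvCnt
  congr 1
  apply List.map_congr_left
  intro p hp
  obtain ⟨hlen, hmem⟩ := pvWalks_shape A n (n - 1) p hp
  have hTlt : pvMaskOf p < 2 ^ n := pvMaskOf_lt n p hmem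
  rw [hfull, pvAltSum n (pvMaskOf p) hTlt]
  by_cases hh : pvMaskOf p = 2 ^ n - 1
  · rw [if_pos hh, if_pos (by simpa using hh)]
  · rw [if_neg hh, if_neg (by simpa using hh)]

-- ===== VERDICT (by name: the statement is the Claim_ definition above) =====
theorem ham_path_count_dp_endpoints_spec : Claim_equal_ham_path_count_dp_endpoints := by
  intro A _ _
  show ham_path_count_dp_endpoints A = ham_path_count_dp_endpoints_alt A
  by_cases hn : 1 ≤ A.length
  · rw [pvAmain A hn, pvBmain A]
    apply pvCnt_congr
    intro p hp
    obtain ⟨hlen, hmem⟩ := pvWalks_shape A A.length (A.length - 1) p hp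
    by_cases hmask : pvMaskOf p = 2 ^ A.length - 1
    · have hnd : p.Nodup := pvFullNodup A.length p (by omega) hmem hmask
      simp [hmask, hnd]
    · simp [hmask]
  · have hA : A = [] := by
      cases A with
      | nil => rfl
      | cons a l => simp at hn
    subst hA
    rw [pvBmain []]
    rfl
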